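-- pv_equiv track=rewrite | github.com/guibastosm/ai-meeting-notes | localwhispr/shortcuts.py | _next_slot_index
-- ===== SOURCE A (Python) =====
-- def _next_slot_index(existing: list[str]) -> int:
--     """Encontra o próximo índice livre para custom keybinding."""
--     used = set()
--     for path in existing:
--         # path like: /org/.../custom0/
--         try:
--             idx = int(path.rstrip("/").split("custom")[-1])
--             used.add(idx)
--         except (ValueError, IndexError):
--             continue
--     i = 0
--     while i in used:
--         i += 1
--     return i
-- ===== SOURCE B (Python) =====
-- def _next_slot_index(existing: list[str]) -> int:
--     """Encontra o próximo índice livre para custom keybinding."""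
--     vals = []
--     for path in existing:
--         try:
--             vals.append(int(path.rstrip("/").split("custom")[-1]))
--         except (ValueError, IndexError):
--             continue
--     expected = 0
--     for v in sorted(vals):
--         if v == expected:
--             expected += 1
--         elif v > expected:
--             break
--     return expected
-- ===== Notes on version B (the rewrite author's own statement) =====
-- stated objective: alternative
-- what changed: Replaces the membership set plus upward while-probe with collecting parsed indices into a list, sorting it, and one sweep with an 'expected' counter that returns the first gap.
import Mathlib
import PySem

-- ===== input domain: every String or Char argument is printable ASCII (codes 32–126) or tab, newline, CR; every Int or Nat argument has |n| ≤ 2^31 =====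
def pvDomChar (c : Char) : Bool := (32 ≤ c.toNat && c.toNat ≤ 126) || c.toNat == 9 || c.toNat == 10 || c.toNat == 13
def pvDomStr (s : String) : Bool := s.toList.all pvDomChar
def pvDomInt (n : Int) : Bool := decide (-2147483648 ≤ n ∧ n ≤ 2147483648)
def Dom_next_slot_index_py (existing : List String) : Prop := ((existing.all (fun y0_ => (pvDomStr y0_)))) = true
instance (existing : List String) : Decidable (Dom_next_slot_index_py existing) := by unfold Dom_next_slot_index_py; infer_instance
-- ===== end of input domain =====

-- B replaces A's membership-set + upward while-probe by sorting the parsed indices and one sweep for the first gap; alternative algorithm, equivalent return value.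


-- ===== PORT A =====
-- shared parse step, identical in both Pythons: int(path.rstrip("/").split("custom")[-1]); none = ValueError/IndexError
-- rstrip("/") is ported by hand as reverse/dropWhile '/'/reverse — exact: it removes exactly the trailing '/' characters
def pvParseIdx (path : String) : Option Int :=
  match PySem.Str.split? ((path.toList.reverse.dropWhile (fun c => c == '/')).reverse |> String.ofList) "custom" with
  | none => none
  | some parts =>
    match PySem.List.pyGet? parts (-1) with
    | none => none
    | some s => PySem.Int.ofStr? s

-- the 'while i in used: i += 1' loop; fuel = |used| + 1 bounds the number of successful membership tests
def pvProbe (used : PySem.Set Int) : Int → Nat → Int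
  | i, 0 => i
  | i, fuel + 1 => if PySem.Set.contains used i then pvProbe used (i + 1) fuel else i

def next_slot_index_py (existing : List String) : Int :=
  let used : PySem.Set Int := existing.foldl
    (fun s path => match pvParseIdx path with
      | some idx => PySem.Set.add s idx
      | none => s) PySem.Set.empty
  pvProbe used 0 (used.length + 1)

-- ===== PORT B =====
def pvSweep : List Int → Int → Int
  | [], expected => expected
  | v :: t, expected =>
      if v == expected then pvSweep t (expected + 1)
      else if v > expected then expected
      else pvSweep t expected

def next_slot_index_py_alt (existing : List String) : Int :=
  let vals : List Int := existing.foldl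
    (fun l path => match pvParseIdx path with
      | some idx => l ++ [idx]
      | none => l) []
  pvSweep (PySem.List.sorted vals (fun x => x) false) 0

-- ===== PRECONDITION & SPEC =====
def Spec_next_slot_index_py (existing : List String) (out : Int) : Prop := out = next_slot_index_py_alt existing
instance (existing : List String) (out : Int) : Decidable (Spec_next_slot_index_py existing out) := by unfold Spec_next_slot_index_py; infer_instance

-- ===== CLAIM (what is proved, stated in full; the proofs are below) =====
def Claim_equal_next_slot_index_py : Prop := ∀ (existing : List String), Dom_next_slot_index_py existing → Spec_next_slot_index_py existing (next_slot_index_py existing)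

-- ===== LEMMAS AND PROOFS =====

-- A's set accumulator and B's list accumulator have the same members throughout the parse loop
theorem pv_mem_build (paths : List String) (s l : List Int)
    (h : ∀ x, x ∈ s ↔ x ∈ l) (x : Int) :
    x ∈ paths.foldl (fun s path => match pvParseIdx path with
        | some idx => PySem.Set.add s idx | none => s) s ↔
    x ∈ paths.foldl (fun l path => match pvParseIdx path with
        | some idx => l ++ [idx] | none => l) l := by
  induction paths generalizing s l with
  | nil => simpa using h x
  | cons p t ih =>
    simp only [List.foldl_cons]
    cases pvParseIdx p with
    | none => exact ih s l h
    | some idx =>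
      refine ih _ _ (fun y => ?_)
      rw [PySem.Set.mem_add]
      simp [h y]

theorem pv_nodup_build (paths : List String) (s : List Int) (hs : s.Nodup) :
    (paths.foldl (fun s path => match pvParseIdx path with
        | some idx => PySem.Set.add s idx | none => s) s).Nodup := by
  induction paths generalizing s with
  | nil => exact hs
  | cons p t ih =>
    simp only [List.foldl_cons]
    cases pvParseIdx p with
    | none => exact ih s hs
    | some idx => exact ih (PySem.Set.add s idx) (PySem.Set.nodup_add s idx hs)

theorem pv_filter_length_mono {p q : Int → Bool} (t : List Int)
    (h : ∀ x, p x = true → q x = true) :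
    (t.filter p).length ≤ (t.filter q).length := by
  induction t with
  | nil => simp
  | cons a t ih =>
    by_cases hp : p a
    · simp [hp, h a hp]
      omega
    · by_cases hq : q a <;> simp [hp, hq] <;> omega

theorem pv_filter_lt (S : List Int) (i : Int) (hmem : i ∈ S) (hnd : S.Nodup) :
    (S.filter (fun x => decide (i < x))).length < (S.filter (fun x => decide (i ≤ x))).length := by
  induction S with
  | nil => simp at hmem
  | cons a t ih =>
    rcases List.nodup_cons.mp hnd with ⟨hat, hnt⟩
    rcases List.mem_cons.mp hmem with rfl | hit
    · have hmono := pv_filter_length_mono (p := fun x => decide (i < x))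
        (q := fun x => decide (i ≤ x)) t (by intro x hx; simp at hx ⊢; omega)
      simp
      omega
    · have hlt := ih hit hnt
      by_cases h1 : (i : Int) < a <;> by_cases h2 : i ≤ a <;>
        [skip; exact absurd (by omega : i ≤ a) h2; skip; skip] <;>
        simp [h1, h2] <;> omega

-- A's probe returns the least j ≥ i outside S (fuel permitting)
theorem pv_probe_spec (fuel : Nat) (S : PySem.Set Int) :
    ∀ i : Int, (S.filter (fun x => decide (i ≤ x))).length < fuel → S.Nodup →
      pvProbe S i fuel ∉ S ∧ i ≤ pvProbe S i fuel ∧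
        ∀ j, i ≤ j → j < pvProbe S i fuel → j ∈ S := by
  induction fuel with
  | zero => intro i h _; omega
  | succ n ih =>
    intro i h hnd
    by_cases hm : i ∈ S
    · have hc : PySem.Set.contains S i = true := by
        rw [PySem.Set.contains_iff]; exact hm
      have hstep : pvProbe S i (n + 1) = pvProbe S (i + 1) n := by simp [pvProbe, hm]
      rw [hstep]
      obtain ⟨h1, h2, h3⟩ := ih (i + 1) (by
        have hfl := pv_filter_lt S i hm hnd
        have heq : (fun x : Int => decide (i + 1 ≤ x)) = (fun x => decide (i < x)) := by
          funext x; exact decide_eq_decide.mpr (by omega)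
        rw [heq]; omega) hnd
      refine ⟨h1, by omega, fun j hj1 hj2 => ?_⟩
      rcases eq_or_lt_of_le hj1 with rfl | hj
      · exact hm
      · exact h3 j (by omega) hj2
    · have hc : PySem.Set.contains S i = false := by
        cases hcc : PySem.Set.contains S i
        · rfl
        · rw [PySem.Set.contains_iff] at hcc; exact absurd hcc hm
      have hstep : pvProbe S i (n + 1) = i := by simp [pvProbe, hm]
      rw [hstep]
      exact ⟨hm, le_refl i, fun j hj1 hj2 => absurd hj2 (by omega)⟩

-- B's sweep over a sorted list returns the least j ≥ expected outside the list
theorem pv_sweep_spec (l : List Int) :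
    ∀ expected : Int, l.Pairwise (· ≤ ·) →
      pvSweep l expected ∉ l ∧ expected ≤ pvSweep l expected ∧
        ∀ j, expected ≤ j → j < pvSweep l expected → j ∈ l := by
  induction l with
  | nil =>
    intro e _
    exact ⟨by simp, le_refl e, fun j h1 h2 => absurd h2 (by simp only [pvSweep] at h2 ⊢; omega)⟩
  | cons v t ih =>
    intro e hp
    rcases List.pairwise_cons.mp hp with ⟨hvt, hpt⟩
    by_cases hve : v = e
    · have hb : (v == e) = true := by simp [hve]
      have hstep : pvSweep (v :: t) e = pvSweep t (e + 1) := by simp [pvSweep, hb]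
      rw [hstep]
      obtain ⟨h1, h2, h3⟩ := ih (e + 1) hpt
      refine ⟨?_, by omega, fun j hj1 hj2 => ?_⟩
      · simp only [List.mem_cons, not_or]
        exact ⟨by omega, h1⟩
      · by_cases hje : j = e
        · simp [hje, hve]
        · exact List.mem_cons_of_mem _ (h3 j (by omega) hj2)
    · have hb : (v == e) = false := by simp [hve]
      by_cases hgt : v > e
      · have hstep : pvSweep (v :: t) e = e := by simp [pvSweep, hb, hgt]
        rw [hstep]
        refine ⟨?_, le_refl e, fun j h1 h2 => absurd h2 (by omega)⟩
        simp only [List.mem_cons, not_or]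
        refine ⟨by omega, fun he => ?_⟩
        have := hvt e he; omega
      · have hstep : pvSweep (v :: t) e = pvSweep t e := by simp [pvSweep, hb, hgt]
        rw [hstep]
        obtain ⟨h1, h2, h3⟩ := ih e hpt
        refine ⟨?_, h2, fun j hj1 hj2 => List.mem_cons_of_mem _ (h3 j hj1 hj2)⟩
        simp only [List.mem_cons, not_or]
        refine ⟨by omega, h1⟩

-- the two mex computations agree when the set and the list have the same members
theorem pv_main (S : PySem.Set Int) (vals : List Int) (hnd : S.Nodup)
    (hmem : ∀ x, x ∈ S ↔ x ∈ vals) :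
    pvProbe S 0 (S.length + 1) = pvSweep (PySem.List.sorted vals (fun x => x) false) 0 := by
  obtain ⟨a1, a2, a3⟩ := pv_probe_spec (S.length + 1) S 0
    (by have := List.length_filter_le (fun x => decide ((0:Int) ≤ x)) S; omega) hnd
  obtain ⟨b1, b2, b3⟩ := pv_sweep_spec (PySem.List.sorted vals (fun x => x) false) 0
    (PySem.List.sorted_pairwise vals (fun x => x))
  have hmem' : ∀ x, x ∈ S ↔ x ∈ PySem.List.sorted vals (fun x => x) false := by
    intro x; rw [hmem x, PySem.List.mem_sorted]
  rcases lt_trichotomy (pvProbe S 0 (S.length + 1))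
      (pvSweep (PySem.List.sorted vals (fun x => x) false) 0) with h | h | h
  · exact absurd ((hmem' _).mpr (b3 _ a2 h)) a1
  · exact h
  · exact absurd ((hmem' _).mp (a3 _ b2 h)) b1

-- ===== VERDICT (by name: the statement is the Claim_ definition above) =====
set_option maxHeartbeats 1000000 in
theorem next_slot_index_py_spec : Claim_equal_next_slot_index_py := by
  intro existing _
  unfold Spec_next_slot_index_py
  simp only [next_slot_index_py, next_slot_index_py_alt]
  exact pv_main _ _ (pv_nodup_build existing _ List.nodup_nil)
    (pv_mem_build existing [] [] (fun y => Iff.rfl))
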